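-- pv_equiv track=rewrite | github.com/ProgramFan/bentoo | bentoo/common/helpers.py | make_process_grid
-- ===== SOURCE A (Python) =====
-- import functools
--
-- def make_process_grid(n, dim=3):
--     def is_prime(x):
--         if x == 1:
--             return True
--         for i in range(2, x // 2 + 1):
--             if x % i == 0:
--                 return False
--         return True
--
--     def prime_factors(x):
--         if is_prime(x):
--             return [x]
--         result = []
--         for v in range(2, x // 2 + 1):
--             if not is_prime(v):
--                 continue
--             if n % v == 0:
--                 result.append(v)
--         return result
--
--     def min_index(l):
--         v = l[0]
--         i = 0
--         for i1, v1 in enumerate(l):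
--             if v1 < v:
--                 i = i1
--                 v = v1
--         return (i, v)
--
--     def max_index(l):
--         v = l[0]
--         i = 0
--         for i1, v1 in enumerate(l):
--             if v1 > v:
--                 i = i1
--                 v = v1
--         return (i, v)
--
--     all_primes = prime_factors(n)
--     result = [1 for i in range(dim)]
--     if n == 1:
--         return result
--     elif n == 2:
--         result[0] = n
--         return result
--     i = 0
--     n1 = n
--     for v in all_primes:
--         while n1 % v == 0:
--             result[i % dim] *= v
--             i += 1
--             n1 //= v
--     result = sorted(result, reverse=True)
--     for v in all_primes:
--         while True:
--             max_idx, max_val = max_index(result)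
--             min_idx, min_val = min_index(result)
--             if max_val > min_val * v and max_val % v == 0:
--                 result[max_idx] //= v
--                 result[min_idx] *= v
--             else:
--                 break
--     assert functools.reduce(lambda x, y: x * y, result) == n
--     return sorted(result, reverse=True)
-- ===== SOURCE B (Python) =====
-- def make_process_grid(n, dim=3):
--     # Factor n by trial division up to sqrt(n) (collecting each prime's exponent in one
--     # pass) instead of A's primality-testing of every candidate in [2, n//2]; distribute
--     # the prime powers round-robin, then rebalance on the multiset with builtin max/min.
--     result = [1] * dim
--     factors = []  # (prime, exponent) in ascending prime order
--     m = n
--     d = 2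
--     while d * d <= m:
--         if m % d == 0:
--             e = 0
--             while m % d == 0:
--                 m //= d
--                 e += 1
--             factors.append((d, e))
--         d += 1
--     if m != 1:
--         factors.append((m, 1))
--     i = 0
--     for p, e in factors:
--         for _ in range(e):
--             result[i % dim] *= p
--             i += 1
--     result.sort(reverse=True)
--     for p, _ in factors:
--         while True:
--             mx = max(result)
--             mn = min(result)
--             if mx > mn * p and mx % p == 0:
--                 result.remove(mx)
--                 result.remove(mn)
--                 result += [mx // p, mn * p]
--             else:
--                 break
--     return sorted(result, reverse=True)
-- ===== Notes on version B (the rewrite author's own statement) =====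
-- stated objective: faster
-- what changed: B factors n by trial division up to sqrt(n) with exponents collected in one pass (instead of A's primality-testing every v in [2, n//2] with an O(v) divisor scan each), and its rebalancing step uses builtin max/min/index instead of hand-rolled index scans.
import Mathlib
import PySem

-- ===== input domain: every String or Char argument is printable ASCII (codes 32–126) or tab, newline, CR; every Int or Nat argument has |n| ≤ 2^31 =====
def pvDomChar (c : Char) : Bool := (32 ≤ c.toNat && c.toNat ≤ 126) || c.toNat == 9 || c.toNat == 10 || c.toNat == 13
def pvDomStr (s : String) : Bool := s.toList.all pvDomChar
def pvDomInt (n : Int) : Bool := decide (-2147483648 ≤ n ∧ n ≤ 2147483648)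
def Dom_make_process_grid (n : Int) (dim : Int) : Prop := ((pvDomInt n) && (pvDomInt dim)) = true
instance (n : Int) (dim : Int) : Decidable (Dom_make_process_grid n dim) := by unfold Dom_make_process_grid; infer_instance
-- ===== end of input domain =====

-- B replaces A's O(n^2) factorization (primality-testing every candidate in [2, n//2]) by
-- trial division up to sqrt(n) with exponents collected in one pass, and rebalances the
-- multiset by remove/append with builtin max/min instead of hand-rolled index scans.


-- ===== PORT A =====

-- is_prime(x): the Python loop returns False at the first divisor; the fold keeps the
-- accumulator false from that point on, computing the same value.
def pvA_isPrime (x : Int) : Bool :=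
  if x == 1 then true
  else (PySem.List.pyRange 2 (PySem.Int.floordiv x 2 + 1) 1).foldl
    (fun ok i => if PySem.Int.mod x i == 0 then false else ok) true

-- prime_factors(x) (a closure reading the outer n)
def pvA_primeFactors (n x : Int) : List Int :=
  if pvA_isPrime x then [x]
  else (PySem.List.pyRange 2 (PySem.Int.floordiv x 2 + 1) 1).foldl
    (fun result v =>
      if !(pvA_isPrime v) then result
      else if PySem.Int.mod n v == 0 then result ++ [v]
      else result) []

-- min_index(l) / max_index(l); l[0] raises IndexError on empty l in Python — unreachable
-- under Pre_ (the pyGetD default is never read there)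
def pvA_minIndex (l : List Int) : Int × Int :=
  (PySem.List.enumerate l).foldl
    (fun s p => if p.2 < s.2 then p else s) (0, PySem.List.pyGetD l 0 0)

def pvA_maxIndex (l : List Int) : Int × Int :=
  (PySem.List.enumerate l).foldl
    (fun s p => if p.2 > s.2 then p else s) (0, PySem.List.pyGetD l 0 0)

-- while n1 % v == 0: result[i % dim] *= v; i += 1; n1 //= v
-- fuel n1.natAbs + 1 bounds the loop: each pass divides n1 exactly by v, so wherever the
-- Python loop terminates |n1| strictly decreases and the fuel is never exhausted.
def pvA_divLoop (dim v : Int) : Nat → (List Int × Int × Int) → (List Int × Int × Int)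
  | 0, s => s
  | fuel+1, (result, i, n1) =>
    if PySem.Int.mod n1 v = 0 then
      pvA_divLoop dim v fuel
        (PySem.List.pySetD result (PySem.Int.mod i dim)
          (PySem.List.pyGetD result (PySem.Int.mod i dim) 0 * v), i + 1,
         PySem.Int.floordiv n1 v)
    else (result, i, n1)

-- for v in all_primes: while n1 % v == 0: ...
def pvA_distLoop (dim : Int) : List Int → (List Int × Int × Int) → (List Int × Int × Int)
  | [], s => s
  | v :: vs, (result, i, n1) =>
    pvA_distLoop dim vs (pvA_divLoop dim v (n1.natAbs + 1) (result, i, n1))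

-- while True: max_idx, max_val = max_index(result); min_idx, min_val = min_index(result); ...
-- fuel: each executed swap strictly decreases the sum of |entries| wherever the Python loop
-- terminates, so (sum of |entries|) + 1 steps are never exhausted there.
def pvA_rebalLoop (v : Int) : Nat → List Int → List Int
  | 0, result => result
  | fuel+1, result =>
    let mx := pvA_maxIndex result
    let mn := pvA_minIndex result
    if mx.2 > mn.2 * v ∧ PySem.Int.mod mx.2 v = 0 then
      let r1 := PySem.List.pySetD result mx.1 (PySem.Int.floordiv mx.2 v)
      pvA_rebalLoop v fuel (PySem.List.pySetD r1 mn.1 (PySem.List.pyGetD r1 mn.1 0 * v))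
    else result

-- make_process_grid(n, dim); the final assert never fires on inputs admitted by Pre_
-- (the loops preserve the product of the entries), so it is not modeled.
def make_process_grid (n : Int) (dim : Int) : List Int :=
  let all_primes := pvA_primeFactors n n
  let result0 := (PySem.List.pyRange 0 dim 1).map (fun _ => (1 : Int))
  if n == 1 then result0
  else if n == 2 then PySem.List.pySetD result0 0 n
  else
    let s := pvA_distLoop dim all_primes (result0, 0, n)
    let r1 := PySem.List.sorted s.1 (fun x => x) true
    let r2 := all_primes.foldl
      (fun r v => pvA_rebalLoop v ((r.map Int.natAbs).sum + 1) r) r1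
    PySem.List.sorted r2 (fun x => x) true

-- ===== PORT B =====

-- e = 0; while m % d == 0: m //= d; e += 1   (fuel m.natAbs + 1: |m| strictly decreases
-- wherever the Python loop terminates)
def pvB_countDiv (d : Int) : Nat → (Int × Int) → (Int × Int)
  | 0, s => s
  | fuel+1, (m, e) =>
    if PySem.Int.mod m d = 0 then
      pvB_countDiv d fuel (PySem.Int.floordiv m d, e + 1)
    else (m, e)

-- while d * d <= m: ...  (fuel n.natAbs + 2: d increases every pass and the guard needs d*d ≤ m ≤ n)
def pvB_trial : Nat → Int → Int → List (Int × Int) → (Int × List (Int × Int))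
  | 0, m, _, factors => (m, factors)
  | fuel+1, m, d, factors =>
    if d * d ≤ m then
      if PySem.Int.mod m d = 0 then
        let r := pvB_countDiv d (m.natAbs + 1) (m, 0)
        pvB_trial fuel r.1 (d + 1) (factors ++ [(d, r.2)])
      else pvB_trial fuel m (d + 1) factors
    else (m, factors)

def pvB_factors (n : Int) : List (Int × Int) :=
  let r := pvB_trial (n.natAbs + 2) n 2 []
  if r.1 ≠ 1 then r.2 ++ [(r.1, 1)] else r.2

-- for p, e in factors: for _ in range(e): result[i % dim] *= p; i += 1
def pvB_dist (dim : Int) : List (Int × Int) → (List Int × Int) → (List Int × Int)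
  | [], s => s
  | (p, e) :: fs, s =>
    pvB_dist dim fs ((PySem.List.pyRange 0 e 1).foldl
      (fun (s : List Int × Int) _ =>
        (PySem.List.pySetD s.1 (PySem.Int.mod s.2 dim)
          (PySem.List.pyGetD s.1 (PySem.Int.mod s.2 dim) 0 * p), s.2 + 1)) s)

-- while True: mx = max(result); mn = min(result); ... remove/remove/append
-- max()/min() raise on an empty list in Python — unreachable under Pre_ (the getD defaults
-- are never read there); list.remove cannot raise since mx and mn are members.
-- Same fuel bound as A's while-True loop.
def pvB_rebalLoop (p : Int) : Nat → List Int → List Int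
  | 0, result => result
  | fuel+1, result =>
    let mx := (PySem.List.max? result (fun x => x)).getD 0
    let mn := (PySem.List.min? result (fun x => x)).getD 0
    if mx > mn * p ∧ PySem.Int.mod mx p = 0 then
      let r1 := (PySem.List.remove? result mx).getD []
      let r2 := (PySem.List.remove? r1 mn).getD []
      pvB_rebalLoop p fuel (r2 ++ [PySem.Int.floordiv mx p, mn * p])
    else result

def make_process_grid_alt (n : Int) (dim : Int) : List Int :=
  let result0 := PySem.List.pyRepeat [(1 : Int)] dim
  let factors := pvB_factors n
  let s := pvB_dist dim factors (result0, 0)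
  let r1 := PySem.List.sorted s.1 (fun x => x) true
  let r2 := factors.foldl
    (fun r pe => pvB_rebalLoop pe.1 ((r.map Int.natAbs).sum + 1) r) r1
  PySem.List.sorted r2 (fun x => x) true

-- ===== PRECONDITION & SPEC =====

-- Pre_ excludes exactly the inputs on which the Python A does not return normally:
-- n = 0 raises ZeroDivisionError, n = -1 loops forever, and dim <= 0 with n ≠ 1 raises
-- IndexError or ZeroDivisionError. A returns on every admitted input.
def Pre_make_process_grid (n : Int) (dim : Int) : Prop :=
  n = 1 ∨ (1 ≤ dim ∧ (2 ≤ n ∨ n ≤ -2))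
instance (n : Int) (dim : Int) : Decidable (Pre_make_process_grid n dim) := by
  unfold Pre_make_process_grid; infer_instance

def pvWitness_make_process_grid : Int × Int := (12, 3)

def Spec_make_process_grid (n : Int) (dim : Int) (out : List Int) : Prop :=
  out = make_process_grid_alt n dim
instance (n : Int) (dim : Int) (out : List Int) : Decidable (Spec_make_process_grid n dim out) := by
  unfold Spec_make_process_grid; infer_instance

-- ===== CLAIM (what is proved, stated in full; the proofs are below) =====
def Claim_equal_make_process_grid : Prop :=
  ∀ (n : Int) (dim : Int), Dom_make_process_grid n dim → Pre_make_process_grid n dim →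
    Spec_make_process_grid n dim (make_process_grid n dim)

-- ===== LEMMAS AND PROOFS =====

theorem pvSortedMemEq {α : Type} [LinearOrder α] :
    ∀ (l1 l2 : List α), l1.Pairwise (· < ·) → l2.Pairwise (· < ·) →
    (∀ x, x ∈ l1 ↔ x ∈ l2) → l1 = l2 := by
  intro l1
  induction l1 with
  | nil =>
    intro l2 _ _ hm
    cases l2 with
    | nil => rfl
    | cons b t2 => exact absurd ((hm b).2 (by simp)) (by simp)
  | cons a t1 ih =>
    intro l2 h1 h2 hm
    cases l2 with
    | nil => exact absurd ((hm a).1 (by simp)) (by simp)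
    | cons b t2 =>
      have hab : a = b := by
        have ha2 : a ∈ b :: t2 := (hm a).1 (by simp)
        have hb1 : b ∈ a :: t1 := (hm b).2 (by simp)
        rcases List.mem_cons.1 ha2 with h | h
        · exact h
        · rcases List.mem_cons.1 hb1 with h' | h'
          · exact h'.symm
          · have := (List.pairwise_cons.1 h2).1 a h
            have := (List.pairwise_cons.1 h1).1 b h'
            exact absurd ‹b < a› (not_lt.2 (le_of_lt ‹a < b›))
      subst hab
      have ht : t1 = t2 := by
        apply ih t2 (List.pairwise_cons.1 h1).2 (List.pairwise_cons.1 h2).2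
        intro x
        constructor
        · intro hx
          have hax := (List.pairwise_cons.1 h1).1 x hx
          rcases List.mem_cons.1 ((hm x).1 (List.mem_cons_of_mem _ hx)) with h | h
          · exact absurd h (ne_of_lt hax).symm
          · exact h
        · intro hx
          have hax := (List.pairwise_cons.1 h2).1 x hx
          rcases List.mem_cons.1 ((hm x).2 (List.mem_cons_of_mem _ hx)) with h | h
          · exact absurd h (ne_of_lt hax).symm
          · exact h
      rw [ht]

theorem pvSortedRevEq (xs ys : List Int) (h : ys.Perm xs)
    (hp : ys.Pairwise (fun a b => b ≤ a)) :
    PySem.List.sorted xs (fun x => x) true = ys := by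
  apply PySem.List.eq_of_perm_of_pairwise_le_of_injective (fun x : Int => -x)
    (fun a b hab => by simpa using hab)
  · exact (PySem.List.sorted_perm xs (fun x => x) true).trans h.symm
  · have := PySem.List.sorted_pairwise_rev (xs := xs) (key := fun x : Int => x)
    exact this.imp (by intro a b hab; simpa using hab)
  · exact hp.imp (by intro a b hab; simpa using hab)

theorem pvSortedRevCongr (xs ys : List Int) (h : xs.Perm ys) :
    PySem.List.sorted xs (fun x => x) true = PySem.List.sorted ys (fun x => x) true := by
  apply pvSortedRevEq
  · exact (PySem.List.sorted_perm ys (fun x => x) true).trans h.symm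
  · have := PySem.List.sorted_pairwise_rev (xs := ys) (key := fun x : Int => x)
    exact this.imp (by intro a b hab; simpa using hab)

def pvPrimesAsc (N : ℕ) : List ℕ :=
  (List.range (N + 1)).filter (fun p => decide (p.Prime ∧ p ∣ N))

theorem pv_mem_PrimesAsc {N p : ℕ} (hN : 1 ≤ N) :
    p ∈ pvPrimesAsc N ↔ p.Prime ∧ p ∣ N := by
  unfold pvPrimesAsc
  simp only [List.mem_filter, List.mem_range, decide_eq_true_eq]
  constructor
  · exact fun h => h.2
  · intro h
    exact ⟨Nat.lt_succ_of_le (Nat.le_of_dvd hN h.2), h⟩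

theorem pv_pairwise_PrimesAsc (N : ℕ) : (pvPrimesAsc N).Pairwise (· < ·) :=
  List.Pairwise.filter _ (List.pairwise_lt_range)

theorem pvA_isPrime_iff (x : Int) (hx : 2 ≤ x) :
    pvA_isPrime x = true ↔ x.toNat.Prime := by
  have h1 : (x == 1) = false := by simp; omega
  rw [pvA_isPrime, h1]
  simp only [Bool.false_eq_true, if_false]
  rw [PySem.List.foldl_if_false_eq]
  simp only [Bool.true_and, Bool.not_eq_eq_eq_not, Bool.not_true, List.any_eq_false,
    PySem.List.mem_pyRange_one]
  have hxN : x = ((x.toNat : ℕ) : Int) := by omega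
  set N := x.toNat with hN
  have hN2 : 2 ≤ N := by omega
  have hfd : PySem.Int.floordiv x 2 = ((N / 2 : ℕ) : Int) := by
    rw [hxN]; exact_mod_cast PySem.Int.floordiv_natCast N 2
  constructor
  · intro h
    by_contra hnp
    obtain ⟨m, hdvd, hm2, hmN⟩ := Nat.exists_dvd_of_not_prime2 hN2 hnp
    have hmhalf : m ≤ N / 2 := by
      obtain ⟨c, hc⟩ := hdvd
      have hc2 : 2 ≤ c := by
        rcases c with _ | c
        · omega
        · rcases c with _ | c
          · omega
          · omega
      have : m * 2 ≤ N := by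
        calc m * 2 ≤ m * c := Nat.mul_le_mul_left m hc2
        _ = N := hc.symm
      exact (Nat.le_div_iff_mul_le (by norm_num)).2 this
    have := h (m : Int) ⟨by exact_mod_cast hm2, by rw [hfd]; push_cast; omega⟩
    rw [beq_iff_eq, PySem.Int.mod_eq_zero_iff_dvd] at this
    exact this (by rw [hxN]; exact_mod_cast hdvd)
  · intro hp i hi
    simp only [beq_iff_eq, PySem.Int.mod_eq_zero_iff_dvd]
    intro hdvd
    have hi2 : 2 ≤ i := hi.1
    have hihalf : i ≤ ((N / 2 : ℕ) : Int) := by rw [← hfd]; omega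
    have hiN : i.toNat < N := by
      have : (N : Int) / 2 < N := by
        have := Nat.div_lt_self (by omega : 0 < N) (by norm_num : 1 < 2)
        exact_mod_cast this
      omega
    have hdvdN : i.toNat ∣ N := by
      have : (i.toNat : Int) ∣ ((N:ℕ) : Int) := by
        rw [← hxN]; convert hdvd; omega
      exact_mod_cast this
    rcases (Nat.Prime.eq_one_or_self_of_dvd hp _ hdvdN) with h | h <;> omega

theorem pvA_isPrime_of_nonpos (x : Int) (hx : x ≤ 0) : pvA_isPrime x = true := by
  have h1 : (x == 1) = false := by simp; omega
  rw [pvA_isPrime, h1]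
  simp only [Bool.false_eq_true, if_false]
  rw [PySem.List.pyRange_one_eq_nil (by
    have : PySem.Int.floordiv x 2 ≤ 0 := by
      by_contra hpos
      push_neg at hpos
      have := (PySem.Int.le_floordiv_iff_mul_le (a := x) (b := 2) (q := 1) (by norm_num)).1 (by omega)
      omega
    omega)]
  rfl

theorem pv_dvd_le_half {N m : ℕ} (h : m ∣ N) (h2 : 2 ≤ m) (hlt : m < N) : m ≤ N / 2 := by
  obtain ⟨c, hc⟩ := h
  have hc2 : 2 ≤ c := by
    rcases c with _ | c
    · omega
    · rcases c with _ | c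
      · omega
      · omega
  have hm2 : m * 2 ≤ N := by
    calc m * 2 ≤ m * c := Nat.mul_le_mul_left m hc2
    _ = N := hc.symm
  exact (Nat.le_div_iff_mul_le (by norm_num)).2 hm2

theorem pvPrimesAsc_prime {M : ℕ} (hp : M.Prime) : pvPrimesAsc M = [M] := by
  apply pvSortedMemEq
  · exact pv_pairwise_PrimesAsc M
  · simp
  · intro x
    rw [pv_mem_PrimesAsc (le_of_lt hp.one_lt)]
    simp only [List.mem_singleton]
    constructor
    · rintro ⟨hxp, hxd⟩
      rcases (Nat.Prime.eq_one_or_self_of_dvd hp _ hxd) with h | h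
      · exact absurd h hxp.ne_one
      · exact h
    · rintro rfl
      exact ⟨hp, dvd_refl _⟩

theorem pvPrimesAsc_ne_nil {M : ℕ} (h : 2 ≤ M) : pvPrimesAsc M ≠ [] := by
  obtain ⟨p, hp, hpd⟩ := Nat.exists_prime_and_dvd (by omega : M ≠ 1)
  intro hnil
  have := (pv_mem_PrimesAsc (by omega : 1 ≤ M)).2 ⟨hp, hpd⟩
  rw [hnil] at this
  simp at this

theorem pvA_primes_eq (n : Int) (hn : 2 ≤ n) :
    pvA_primeFactors n n = (pvPrimesAsc n.toNat).map (fun p : ℕ => (p : Int)) := by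
  have hnN : n = ((n.toNat : ℕ) : Int) := by omega
  set N := n.toNat with hNdef
  have hN2 : 2 ≤ N := by omega
  have hfd : PySem.Int.floordiv n 2 = ((N / 2 : ℕ) : Int) := by
    rw [hnN]; exact_mod_cast PySem.Int.floordiv_natCast N 2
  by_cases hp : N.Prime
  · rw [pvA_primeFactors, if_pos (by rw [pvA_isPrime_iff n hn]; exact hp)]
    rw [pvPrimesAsc_prime hp]
    simp [← hnN]
  · rw [pvA_primeFactors, if_neg (by rw [pvA_isPrime_iff n hn]; exact hp)]
    rw [PySem.List.foldl_congr_mem _ _ (fun result v =>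
      if (pvA_isPrime v && (PySem.Int.mod n v == 0)) = true then result ++ [v] else result) _
      (by
        intro acc v _
        cases hv : pvA_isPrime v <;> cases hc : (PySem.Int.mod n v == 0) <;>
          simp [hv, hc])]
    rw [PySem.List.foldl_append_if_eq_filter]
    rw [List.nil_append]
    apply pvSortedMemEq
    · exact List.Pairwise.filter _ (PySem.List.pairwise_lt_pyRange_one 2 _)
    · exact List.Pairwise.map _ (by intro a b hab; exact_mod_cast hab)
        (pv_pairwise_PrimesAsc N)
    · intro x
      rw [List.mem_filter, PySem.List.mem_pyRange_one]
      simp only [List.mem_map]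
      constructor
      · rintro ⟨⟨hx2, hxlt⟩, hq⟩
        rw [Bool.and_eq_true, pvA_isPrime_iff x hx2, beq_iff_eq,
          PySem.Int.mod_eq_zero_iff_dvd] at hq
        refine ⟨x.toNat, ⟨(pv_mem_PrimesAsc (by omega : 1 ≤ N)).2 ⟨hq.1, ?_⟩, by omega⟩⟩
        have : (x.toNat : Int) ∣ ((N : ℕ) : Int) := by
          rw [← hnN]; convert hq.2 using 2; omega
        exact_mod_cast this
      · rintro ⟨p, hpmem, rfl⟩
        obtain ⟨hpp, hpd⟩ := (pv_mem_PrimesAsc (by omega : 1 ≤ N)).1 hpmem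
        have hp2 : 2 ≤ p := hpp.two_le
        have hpN : p ≠ N := by rintro rfl; exact hp hpp
        have hple : p ≤ N / 2 :=
          pv_dvd_le_half hpd hp2 (lt_of_le_of_ne (Nat.le_of_dvd (by omega) hpd) hpN)
        refine ⟨⟨by exact_mod_cast hp2, by rw [hfd]; push_cast; omega⟩, ?_⟩
        rw [Bool.and_eq_true, pvA_isPrime_iff _ (by exact_mod_cast hp2), beq_iff_eq,
          PySem.Int.mod_eq_zero_iff_dvd]
        refine ⟨by simpa using hpp, ?_⟩
        rw [hnN]
        exact_mod_cast hpd

theorem pvCountDiv_spec : ∀ (fuel : ℕ) (P M : ℕ) (e0 : Int), P.Prime → 0 < M → M < fuel →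
    pvB_countDiv (P : Int) fuel ((M : Int), e0) =
      (((M / P ^ M.factorization P : ℕ) : Int), e0 + (M.factorization P : Int)) := by
  intro fuel
  induction fuel with
  | zero => intro P M e0 _ _ h; omega
  | succ fuel ih =>
    intro P M e0 hP hM hfuel
    rw [pvB_countDiv]
    by_cases hdvd : P ∣ M
    · rw [if_pos (by rw [PySem.Int.mod_eq_zero_iff_dvd]; exact_mod_cast hdvd)]
      have hfd : PySem.Int.floordiv (M : Int) (P : Int) = ((M / P : ℕ) : Int) :=
        PySem.Int.floordiv_natCast M P
      rw [hfd]
      have hMP_pos : 0 < M / P := Nat.div_pos (Nat.le_of_dvd hM hdvd) hP.pos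
      have hMP_lt : M / P < M := Nat.div_lt_self hM hP.one_lt
      rw [ih P (M / P) (e0 + 1) hP hMP_pos (by omega)]
      have hfpos : 0 < M.factorization P :=
        Nat.Prime.factorization_pos_of_dvd hP (by omega) hdvd
      have hfsub : (M / P).factorization P = M.factorization P - 1 := by
        rw [Nat.factorization_div hdvd, Nat.Prime.factorization hP]
        simp [Finsupp.single_eq_same]
      rw [Prod.mk.injEq]
      have hpow : P ^ M.factorization P = P * P ^ (M.factorization P - 1) := by
        conv_lhs => rw [show M.factorization P = (M.factorization P - 1) + 1 by omega]
        rw [pow_succ']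
      refine ⟨?_, ?_⟩
      · rw [hfsub, Nat.div_div_eq_div_mul, ← hpow]
      · rw [hfsub]; omega
    · rw [if_neg (by rw [PySem.Int.mod_eq_zero_iff_dvd]; intro h; exact hdvd (by exact_mod_cast h))]
      rw [Nat.factorization_eq_zero_of_not_dvd hdvd]
      simp

def pvSpecTR (M : ℕ) : List ℕ × ℕ :=
  if M ≤ 1 then ([], M)
  else
    if M.factorization ((pvPrimesAsc M).getLastD 0) = 1 then
      ((pvPrimesAsc M).dropLast, (pvPrimesAsc M).getLastD 0)
    else (pvPrimesAsc M, 1)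

theorem pvSpecTR_sub (M : ℕ) : ∀ p ∈ (pvSpecTR M).1, p ∈ pvPrimesAsc M := by
  unfold pvSpecTR
  split_ifs with h1 h2
  · intro p hp; simp at hp
  · intro p hp; exact (List.dropLast_sublist _).subset hp
  · intro p hp; exact hp

theorem pvFact_ord_compl_eq (M D p : ℕ) (hp : p ≠ D) :
    (M / D ^ M.factorization D).factorization p = M.factorization p := by
  rw [Nat.factorization_ordCompl]
  exact Finsupp.erase_ne hp

theorem pvPrimesAsc_cons (M D : ℕ) (hM : 0 < M) (hD : D.Prime) (hdvd : D ∣ M)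
    (hmin : ∀ j, 2 ≤ j → j < D → ¬ j ∣ M) :
    pvPrimesAsc M = D :: pvPrimesAsc (M / D ^ M.factorization D) := by
  set M' := M / D ^ M.factorization D with hM'
  have hM'pos : 0 < M' := Nat.ordCompl_pos D (by omega)
  have hndvd : ¬ D ∣ M' := Nat.not_dvd_ordCompl hD (by omega)
  have hmem' : ∀ p, p ∈ pvPrimesAsc M' ↔ p.Prime ∧ p ∣ M ∧ p ≠ D := by
    intro p
    rw [pv_mem_PrimesAsc hM'pos]
    constructor
    · rintro ⟨hp, hpd⟩
      refine ⟨hp, hpd.trans (Nat.ordCompl_dvd M D), ?_⟩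
      rintro rfl; exact hndvd hpd
    · rintro ⟨hp, hpd, hpD⟩
      refine ⟨hp, ?_⟩
      rw [Nat.Prime.dvd_iff_one_le_factorization hp (by omega)]
      rw [hM', Nat.factorization_ordCompl, Finsupp.erase_ne hpD]
      rw [← Nat.Prime.dvd_iff_one_le_factorization hp (by omega)]
      exact hpd
  apply pvSortedMemEq
  · exact pv_pairwise_PrimesAsc M
  · rw [List.pairwise_cons]
    refine ⟨fun p hp => ?_, pv_pairwise_PrimesAsc M'⟩
    obtain ⟨hpp, hpd, hpD⟩ := (hmem' p).1 hp
    have hge : D ≤ p := by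
      by_contra h
      exact hmin p hpp.two_le (by omega) hpd
    omega
  · intro x
    rw [pv_mem_PrimesAsc (by omega : 1 ≤ M), List.mem_cons, hmem' x]
    constructor
    · rintro ⟨hp, hd⟩
      by_cases hx : x = D
      · left; exact hx
      · right; exact ⟨hp, hd, hx⟩
    · rintro (rfl | ⟨hp, hd, _⟩)
      · exact ⟨hD, hdvd⟩
      · exact ⟨hp, hd⟩

theorem pvPrimesAsc_one : pvPrimesAsc 1 = [] := by decide

theorem pvSpecTR_one : pvSpecTR 1 = ([], 1) := by norm_num [pvSpecTR]

theorem pvSpecTR_small (M D : ℕ) (hM : 0 < M) (hD : 2 ≤ D) (hg : M < D * D)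
    (hmin : ∀ j, 2 ≤ j → j < D → ¬ j ∣ M) : pvSpecTR M = ([], M) := by
  rcases Nat.lt_or_ge M 2 with h2 | h2
  · have : M = 1 := by omega
    subst this; exact pvSpecTR_one
  · have hMp : M.Prime := by
      by_contra hnp
      have hsq := Nat.minFac_sq_le_self (by omega) hnp
      have hdm := Nat.minFac_dvd M
      have h2m : 2 ≤ M.minFac := (Nat.minFac_prime (by omega)).two_le
      have hge : D ≤ M.minFac := by
        by_contra h
        exact hmin M.minFac h2m (by omega) hdm
      have : D * D ≤ M.minFac * M.minFac := Nat.mul_le_mul hge hge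
      nlinarith [hsq]
    unfold pvSpecTR
    rw [if_neg (by omega)]
    rw [pvPrimesAsc_prime hMp]
    simp [Nat.Prime.factorization_self hMp]

theorem pvSpecTR_step (M D : ℕ) (hM : 0 < M) (hD : D.Prime) (hg : D * D ≤ M)
    (hdvd : D ∣ M) (hmin : ∀ j, 2 ≤ j → j < D → ¬ j ∣ M) :
    (pvSpecTR M).1 = D :: (pvSpecTR (M / D ^ M.factorization D)).1 ∧
    (pvSpecTR M).2 = (pvSpecTR (M / D ^ M.factorization D)).2 := by
  set M' := M / D ^ M.factorization D with hM'
  have hM'pos : 0 < M' := Nat.ordCompl_pos D (by omega)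
  have hndvd : ¬ D ∣ M' := Nat.not_dvd_ordCompl hD (by omega)
  have hK1 : pvPrimesAsc M = D :: pvPrimesAsc M' := pvPrimesAsc_cons M D hM hD hdvd hmin
  have hD2 : 2 ≤ D := hD.two_le
  have hM4 : 4 ≤ M := le_trans (by nlinarith) hg
  have hself : D ^ M.factorization D * M' = M := Nat.ordProj_mul_ordCompl_eq_self M D
  by_cases h1 : M' ≤ 1
  · have hM'1 : M' = 1 := by omega
    have hMe : M = D ^ M.factorization D := by conv_lhs => rw [← hself, hM'1, mul_one]
    have hfge : 2 ≤ M.factorization D := by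
      by_contra hcon
      have hf1 : M.factorization D = 0 ∨ M.factorization D = 1 := by omega
      rcases hf1 with h | h
      · rw [h, pow_zero] at hMe; omega
      · rw [h, pow_one] at hMe
        have hgg := hg
        rw [hMe] at hgg
        nlinarith [hD2]
    rw [hM'1, pvSpecTR_one]
    unfold pvSpecTR
    rw [if_neg (by omega)]
    have hP1 : pvPrimesAsc M = [D] := by
      rw [hK1, hM'1, pvPrimesAsc_one]
    rw [hP1]
    have hgl1 : ([D] : List ℕ).getLastD 0 = D := rfl
    rw [hgl1]
    rw [if_neg (by omega)]
    exact ⟨by simp, rfl⟩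
  · have h2 : 2 ≤ M' := by omega
    have hPM' : pvPrimesAsc M' ≠ [] := pvPrimesAsc_ne_nil h2
    obtain ⟨q, hq⟩ : ∃ q, (pvPrimesAsc M').getLastD 0 = q := ⟨_, rfl⟩
    have hqmem : q ∈ pvPrimesAsc M' := by
      rw [← hq, List.getLastD_eq_getLast?, List.getLast?_eq_getLast hPM']
      simp only [Option.getD_some]
      exact List.getLast_mem hPM'
    have hgl : (D :: pvPrimesAsc M').getLastD 0 = q := by
      rw [List.getLastD_eq_getLast?, ← hq, List.getLastD_eq_getLast?]
      cases hh : pvPrimesAsc M' with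
      | nil => exact absurd hh hPM'
      | cons a t => simp [List.getLast?_cons_cons]
    have hqD : q ≠ D := by
      rintro rfl
      obtain ⟨hqp, hqd⟩ := (pv_mem_PrimesAsc hM'pos).1 hqmem
      exact hndvd hqd
    have hfq : M.factorization q = M'.factorization q := (pvFact_ord_compl_eq M D q hqD).symm
    have hdrop : (D :: pvPrimesAsc M').dropLast = D :: (pvPrimesAsc M').dropLast := by
      cases hh : pvPrimesAsc M' with
      | nil => exact absurd hh hPM'
      | cons a t => rw [List.dropLast_cons₂]
    unfold pvSpecTR
    rw [if_neg (by omega : ¬ M ≤ 1), if_neg (by omega : ¬ M' ≤ 1), hK1, hgl, hq, hfq]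
    by_cases hone : M'.factorization q = 1
    · rw [if_pos hone, if_pos hone]
      exact ⟨by simp only [hdrop], rfl⟩
    · rw [if_neg hone, if_neg hone]
      exact ⟨rfl, rfl⟩

theorem pvB_trial_spec : ∀ (fuel : ℕ) (M D : ℕ) (acc : List (Int × Int)),
    2 ≤ D → 0 < M → (∀ j, 2 ≤ j → j < D → ¬ j ∣ M) → M + 2 ≤ fuel + D →
    pvB_trial fuel (M : Int) (D : Int) acc =
      (((pvSpecTR M).2 : Int),
        acc ++ (pvSpecTR M).1.map (fun p : ℕ => ((p : Int), (M.factorization p : Int)))) := by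
  intro fuel
  induction fuel with
  | zero =>
    intro M D acc hD hM hmin hfuel
    have hM1 : M = 1 := by
      by_contra h
      obtain ⟨p, hp, hpd⟩ := Nat.exists_prime_and_dvd h
      have hle := Nat.le_of_dvd hM hpd
      exact hmin p hp.two_le (by omega) hpd
    subst hM1
    rw [pvSpecTR_one]
    simp [pvB_trial]
  | succ fuel ih =>
    intro M D acc hD hM hmin hfuel
    rw [pvB_trial]
    by_cases hguard : D * D ≤ M
    · rw [if_pos (by exact_mod_cast hguard)]
      have hDM : D ≤ M := le_trans (Nat.le_mul_of_pos_left D (by omega)) hguard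
      by_cases hdvd : D ∣ M
      · rw [if_pos (by rw [PySem.Int.mod_eq_zero_iff_dvd]; exact_mod_cast hdvd)]
        have hDprime : D.Prime := by
          rw [Nat.prime_def_lt]
          refine ⟨hD, fun m hm hmd => ?_⟩
          by_contra h1
          have hm0 : m ≠ 0 := by
            rintro rfl
            rw [Nat.zero_dvd] at hmd
            omega
          exact hmin m (by omega) (by omega) (hmd.trans hdvd)
        have hcd : pvB_countDiv (D : Int) (((M : Int)).natAbs + 1) ((M : Int), 0) =
            (((M / D ^ M.factorization D : ℕ) : Int), 0 + (M.factorization D : Int)) := by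
          rw [Int.natAbs_natCast]
          exact pvCountDiv_spec (M + 1) D M 0 hDprime hM (by omega)
        simp only [hcd, zero_add]
        have hM'pos : 0 < M / D ^ M.factorization D := Nat.ordCompl_pos D (by omega)
        have hM'min : ∀ j, 2 ≤ j → j < D + 1 → ¬ j ∣ M / D ^ M.factorization D := by
          intro j h2 hlt hdj
          rcases Nat.lt_or_ge j D with h | h
          · exact hmin j h2 h (hdj.trans (Nat.ordCompl_dvd M D))
          · have hjD : j = D := by omega
            subst hjD
            exact Nat.not_dvd_ordCompl hDprime (by omega) hdj
        have hM'le : M / D ^ M.factorization D ≤ M := Nat.div_le_self _ _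
        have hcast : ((D : Int) + 1) = ((D + 1 : ℕ) : Int) := by push_cast; ring
        rw [hcast]
        rw [ih (M / D ^ M.factorization D) (D + 1)
          (acc ++ [((D : Int), (M.factorization D : Int))]) (by omega) hM'pos hM'min (by omega)]
        obtain ⟨hstep1, hstep2⟩ := pvSpecTR_step M D hM hDprime hguard hdvd hmin
        have hmapeq : (pvSpecTR (M / D ^ M.factorization D)).1.map
              (fun p : ℕ => ((p : Int), ((M / D ^ M.factorization D).factorization p : Int)))
            = (pvSpecTR (M / D ^ M.factorization D)).1.map
              (fun p : ℕ => ((p : Int), (M.factorization p : Int))) := by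
          apply List.map_congr_left
          intro z hz
          have hzP : z ∈ pvPrimesAsc (M / D ^ M.factorization D) := pvSpecTR_sub _ z hz
          have hzD : z ≠ D := by
            rintro rfl
            obtain ⟨hzp, hzd⟩ := (pv_mem_PrimesAsc hM'pos).1 hzP
            exact Nat.not_dvd_ordCompl hDprime (by omega) hzd
          rw [pvFact_ord_compl_eq M D z hzD]
        rw [Prod.mk.injEq]
        constructor
        · rw [hstep2]
        · rw [hstep1, List.map_cons, List.append_assoc, List.singleton_append, hmapeq]
      · rw [if_neg (by rw [PySem.Int.mod_eq_zero_iff_dvd]; intro h; exact hdvd (by exact_mod_cast h))]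
        have hmin' : ∀ j, 2 ≤ j → j < D + 1 → ¬ j ∣ M := by
          intro j h2 hlt
          rcases Nat.lt_or_ge j D with h | h
          · exact hmin j h2 h
          · have hjD : j = D := by omega
            subst hjD
            exact hdvd
        have hcast : ((D : Int) + 1) = ((D + 1 : ℕ) : Int) := by push_cast; ring
        rw [hcast]
        exact ih M (D + 1) acc (by omega) hM hmin' (by omega)
    · rw [if_neg (by intro h; exact hguard (by exact_mod_cast h))]
      rw [pvSpecTR_small M D hM hD (by omega) hmin]
      simp

theorem pvB_factors_eq (n : Int) (hn : 2 ≤ n) :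
    pvB_factors n = (pvPrimesAsc n.toNat).map
      (fun p : ℕ => ((p : Int), ((n.toNat).factorization p : Int))) := by
  have hnN : n = ((n.toNat : ℕ) : Int) := by omega
  set N := n.toNat with hNdef
  have hN2 : 2 ≤ N := by omega
  have hNa : n.natAbs = N := by omega
  rw [pvB_factors, hNa]
  rw [show n = ((N : ℕ) : Int) from hnN, show ((2:ℤ)) = ((2:ℕ) : Int) by norm_num]
  rw [pvB_trial_spec (N + 2) N 2 [] (by omega) (by omega) (by intro j h2 hlt; omega) (by omega)]
  simp only [List.nil_append]
  unfold pvSpecTR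
  rw [if_neg (by omega : ¬ N ≤ 1)]
  have hPne : pvPrimesAsc N ≠ [] := pvPrimesAsc_ne_nil hN2
  set q := (pvPrimesAsc N).getLastD 0 with hq
  have hqmem : q ∈ pvPrimesAsc N := by
    rw [hq, List.getLastD_eq_getLast?]
    rw [List.getLast?_eq_getLast hPne]
    exact List.getLast_mem hPne
  have hq2 : 2 ≤ q := ((pv_mem_PrimesAsc (by omega : 1 ≤ N)).1 hqmem).1.two_le
  by_cases hone : N.factorization q = 1
  · rw [if_pos hone]
    simp only []
    rw [if_pos (by exact_mod_cast (by omega : (q:ℤ) ≠ 1))]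
    have hsplit : pvPrimesAsc N = (pvPrimesAsc N).dropLast ++ [q] := by
      conv_lhs => rw [← List.dropLast_append_getLast hPne]
      congr 1
      rw [hq, List.getLastD_eq_getLast?, List.getLast?_eq_getLast hPne, Option.getD_some]
    conv_rhs => rw [hsplit]
    rw [List.map_append]
    simp [hone]
  · rw [if_neg hone]
    simp only []
    rw [if_neg (by norm_num)]

def pvStep (dim p : Int) (s : List Int × Int) : List Int × Int :=
  (PySem.List.pySetD s.1 (PySem.Int.mod s.2 dim)
    (PySem.List.pyGetD s.1 (PySem.Int.mod s.2 dim) 0 * p), s.2 + 1)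

def pvIterMul (dim p : Int) : Nat → (List Int × Int) → (List Int × Int)
  | 0, s => s
  | e+1, s => pvIterMul dim p e (pvStep dim p s)

theorem pvFoldLen (dim p : Int) : ∀ (l : List Int) (s : List Int × Int),
    l.foldl (fun (s : List Int × Int) _ =>
      (PySem.List.pySetD s.1 (PySem.Int.mod s.2 dim)
        (PySem.List.pyGetD s.1 (PySem.Int.mod s.2 dim) 0 * p), s.2 + 1)) s
    = pvIterMul dim p l.length s := by
  intro l
  induction l with
  | nil => intro s; rfl
  | cons a t ih =>
    intro s
    rw [List.foldl_cons, List.length_cons]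
    exact ih (pvStep dim p s)

theorem pvRangeFold (dim p : Int) (e : ℕ) (s : List Int × Int) :
    (PySem.List.pyRange 0 ((e : ℕ) : Int) 1).foldl
      (fun (s : List Int × Int) _ =>
        (PySem.List.pySetD s.1 (PySem.Int.mod s.2 dim)
          (PySem.List.pyGetD s.1 (PySem.Int.mod s.2 dim) 0 * p), s.2 + 1)) s
    = pvIterMul dim p e s := by
  rw [pvFoldLen]
  congr 1
  rw [PySem.List.length_pyRange_one]
  omega

theorem pvDivLoop_spec (dim : Int) : ∀ (e fuel : ℕ) (res : List Int) (i : Int) (M P : ℕ),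
    P.Prime → 0 < M → M.factorization P = e → e < fuel →
    pvA_divLoop dim (P : Int) fuel (res, i, (M : Int)) =
      ((pvIterMul dim (P : Int) e (res, i)).1, (pvIterMul dim (P : Int) e (res, i)).2,
        ((M / P ^ e : ℕ) : Int)) := by
  intro e
  induction e with
  | zero =>
    intro fuel res i M P hP hM hfac hfuel
    obtain ⟨f, rfl⟩ : ∃ f, fuel = f + 1 := ⟨fuel - 1, by omega⟩
    rw [pvA_divLoop]
    rw [if_neg (by
      rw [PySem.Int.mod_eq_zero_iff_dvd]
      intro h
      have hd : P ∣ M := by exact_mod_cast h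
      have := Nat.Prime.factorization_pos_of_dvd hP (by omega) hd
      omega)]
    simp [pvIterMul]
  | succ e ih =>
    intro fuel res i M P hP hM hfac hfuel
    obtain ⟨f, rfl⟩ : ∃ f, fuel = f + 1 := ⟨fuel - 1, by omega⟩
    have hdvd : P ∣ M := by
      rw [Nat.Prime.dvd_iff_one_le_factorization hP (by omega)]
      omega
    rw [pvA_divLoop]
    rw [if_pos (by rw [PySem.Int.mod_eq_zero_iff_dvd]; exact_mod_cast hdvd)]
    rw [show PySem.Int.floordiv (M : Int) (P : Int) = ((M / P : ℕ) : Int) from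
      PySem.Int.floordiv_natCast M P]
    have hMP_pos : 0 < M / P := Nat.div_pos (Nat.le_of_dvd hM hdvd) hP.pos
    have hfsub : (M / P).factorization P = e := by
      rw [Nat.factorization_div hdvd, Nat.Prime.factorization hP]
      simp only [Finsupp.coe_tsub, Pi.sub_apply, Finsupp.single_eq_same]
      omega
    rw [ih f (PySem.List.pySetD res (PySem.Int.mod i dim)
        (PySem.List.pyGetD res (PySem.Int.mod i dim) 0 * (P : Int))) (i + 1) (M / P) P hP
        hMP_pos hfsub (by omega)]
    have h3 : M / P / P ^ e = M / P ^ (e + 1) := by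
      rw [Nat.div_div_eq_div_mul, ← pow_succ']
    rw [h3]
    rfl

theorem pvDist_eq (dim : Int) : ∀ (ps : List ℕ) (res : List Int) (i : Int) (M : ℕ),
    0 < M → ps.Nodup → (∀ p ∈ ps, p.Prime) →
    ∃ R : ℕ, pvA_distLoop dim (ps.map (fun p : ℕ => (p : Int))) (res, i, (M : Int)) =
      ((pvB_dist dim (ps.map (fun p : ℕ => ((p : Int), (M.factorization p : Int)))) (res, i)).1,
       (pvB_dist dim (ps.map (fun p : ℕ => ((p : Int), (M.factorization p : Int)))) (res, i)).2,
       (R : Int)) := by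
  intro ps
  induction ps with
  | nil => intro res i M hM _ _; exact ⟨M, rfl⟩
  | cons p rest ih =>
    intro res i M hM hnd hpr
    have hp : p.Prime := hpr p (by simp)
    rw [List.map_cons, List.map_cons, pvA_distLoop, pvB_dist]
    rw [show ((M : Int)).natAbs = M from Int.natAbs_natCast M]
    have hordp : p ^ M.factorization p ∣ M := Nat.ordProj_dvd M p
    have helt : M.factorization p < M + 1 := by
      have h1 : M.factorization p < 2 ^ M.factorization p := Nat.lt_two_pow_self
      have h2 : 2 ^ M.factorization p ≤ p ^ M.factorization p :=
        Nat.pow_le_pow_left hp.two_le _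
      have h3 : p ^ M.factorization p ≤ M := Nat.le_of_dvd hM hordp
      omega
    rw [pvDivLoop_spec dim (M.factorization p) (M + 1) res i M p hp hM rfl helt]
    rw [pvRangeFold dim (p : Int) (M.factorization p) (res, i)]
    have hM'pos : 0 < M / p ^ M.factorization p := Nat.ordCompl_pos p (by omega)
    have hmapeq : rest.map (fun q : ℕ => ((q : Int), ((M / p ^ M.factorization p).factorization q : Int)))
        = rest.map (fun q : ℕ => ((q : Int), (M.factorization q : Int))) := by
      apply List.map_congr_left
      intro q hq
      have hqp : q ≠ p := by rintro rfl; exact (List.nodup_cons.1 hnd).1 hq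
      rw [pvFact_ord_compl_eq M p q hqp]
    obtain ⟨R, hR⟩ := ih (pvIterMul dim (p : Int) (M.factorization p) (res, i)).1
      (pvIterMul dim (p : Int) (M.factorization p) (res, i)).2 (M / p ^ M.factorization p)
      hM'pos (List.nodup_cons.1 hnd).2 (fun q hq => hpr q (by simp [hq]))
    rw [hmapeq] at hR
    exact ⟨R, hR⟩

theorem pvStep_inv (dim p : Int) (hdim : 1 ≤ dim) (hp : 1 ≤ p) (s : List Int × Int)
    (hl : s.1.length = dim.toNat) (hpos : ∀ x ∈ s.1, 1 ≤ x) :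
    (pvStep dim p s).1.length = dim.toNat ∧ ∀ x ∈ (pvStep dim p s).1, 1 ≤ x := by
  have hidx0 : 0 ≤ PySem.Int.mod s.2 dim := PySem.Int.mod_nonneg _ (by omega)
  have hidx1 : PySem.Int.mod s.2 dim < dim := PySem.Int.mod_lt _ (by omega)
  constructor
  · simp [pvStep, PySem.List.length_pySetD, hl]
  · intro x hx
    simp only [pvStep] at hx
    have hk : PySem.Int.mod s.2 dim = (((PySem.Int.mod s.2 dim).toNat : ℕ) : Int) := by omega
    rw [hk, PySem.List.pySetD_natCast, PySem.List.pyGetD_natCast] at hx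
    have hklen : (PySem.Int.mod s.2 dim).toNat < s.1.length := by rw [hl]; omega
    rcases List.mem_or_eq_of_mem_set hx with h | h
    · exact hpos x h
    · subst h
      have hget : s.1.getD (PySem.Int.mod s.2 dim).toNat 0 ∈ s.1 := by
        rw [List.getD_eq_getElem?_getD, List.getElem?_eq_getElem hklen, Option.getD_some]
        exact List.getElem_mem hklen
      have h1 := hpos _ hget
      nlinarith

theorem pvIterMul_inv (dim p : Int) (hdim : 1 ≤ dim) (hp : 1 ≤ p) :
    ∀ (e : ℕ) (s : List Int × Int), s.1.length = dim.toNat → (∀ x ∈ s.1, 1 ≤ x) →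
    (pvIterMul dim p e s).1.length = dim.toNat ∧ ∀ x ∈ (pvIterMul dim p e s).1, 1 ≤ x := by
  intro e
  induction e with
  | zero => intro s h1 h2; exact ⟨h1, h2⟩
  | succ e ih =>
    intro s h1 h2
    obtain ⟨h1', h2'⟩ := pvStep_inv dim p hdim hp s h1 h2
    exact ih (pvStep dim p s) h1' h2'

theorem pvDist_inv (dim : Int) (hdim : 1 ≤ dim) : ∀ (pairs : List (Int × Int)) (s : List Int × Int),
    (∀ pe ∈ pairs, 1 ≤ pe.1) → s.1.length = dim.toNat → (∀ x ∈ s.1, 1 ≤ x) →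
    (pvB_dist dim pairs s).1.length = dim.toNat ∧ ∀ x ∈ (pvB_dist dim pairs s).1, 1 ≤ x := by
  intro pairs
  induction pairs with
  | nil => intro s _ h1 h2; exact ⟨h1, h2⟩
  | cons pe rest ih =>
    intro s hpe h1 h2
    obtain ⟨p, e⟩ := pe
    rw [pvB_dist, pvFoldLen]
    obtain ⟨h1', h2'⟩ := pvIterMul_inv dim p hdim (hpe (p, e) (by simp)) _ s h1 h2
    exact ih _ (fun q hq => hpe q (by simp [hq])) h1' h2'

theorem pvFoldSel_aux (l : List Int) (better : Int → Int → Prop)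
    [inst : ∀ a b : Int, Decidable (better a b)]
    (h0 : ∀ a : Int, ¬ better a a)
    (h1 : ∀ a b c : Int, better a b → ¬ better a c → ¬ better b c)
    (h2 : ∀ a b c : Int, ¬ better a b → ¬ better b c → ¬ better a c) :
    ∀ (ent : List (ℤ × ℤ)) (s : ℤ × ℤ),
      (∀ q ∈ ent, ∃ k : ℕ, k < l.length ∧ q.1 = (k : Int) ∧ l[k]? = some q.2) →
      (∃ k : ℕ, k < l.length ∧ s.1 = (k : Int) ∧ l[k]? = some s.2) →
      (∃ k : ℕ, k < l.length ∧
          (ent.foldl (fun s p => if better p.2 s.2 then p else s) s).1 = (k : Int) ∧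
          l[k]? = some (ent.foldl (fun s p => if better p.2 s.2 then p else s) s).2) ∧
      ¬ better s.2 (ent.foldl (fun s p => if better p.2 s.2 then p else s) s).2 ∧
      ∀ q ∈ ent, ¬ better q.2 (ent.foldl (fun s p => if better p.2 s.2 then p else s) s).2 := by
  intro ent
  induction ent with
  | nil =>
    intro s _ hs
    exact ⟨hs, h0 s.2, by simp⟩
  | cons q rest ih =>
    intro s hent hs
    simp only [List.foldl_cons]
    by_cases hb : better q.2 s.2
    · rw [if_pos hb]
      obtain ⟨hex, hi, hall⟩ := ih q (fun z hz => hent z (List.mem_cons_of_mem _ hz))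
        (hent q List.mem_cons_self)
      refine ⟨hex, h1 _ _ _ hb hi, ?_⟩
      intro z hz
      rcases List.mem_cons.1 hz with h | h
      · rw [h]; exact hi
      · exact hall z h
    · rw [if_neg hb]
      obtain ⟨hex, hi, hall⟩ := ih s (fun z hz => hent z (List.mem_cons_of_mem _ hz)) hs
      refine ⟨hex, hi, ?_⟩
      intro z hz
      rcases List.mem_cons.1 hz with h | h
      · rw [h]; exact h2 _ _ _ hb hi
      · exact hall z h

theorem pvEnumCover (l : List Int) :
    ∀ q ∈ PySem.List.enumerate l,
      ∃ k : ℕ, k < l.length ∧ q.1 = (k : Int) ∧ l[k]? = some q.2 := by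
  intro q hq
  obtain ⟨k, hk, rfl⟩ := (PySem.List.mem_enumerate_iff l 0 q).1 hq
  exact ⟨k, hk, by simp, by simp [List.getElem?_eq_getElem hk]⟩

theorem pvInitState (l : List Int) (hl : l ≠ []) :
    ∃ k : ℕ, k < l.length ∧ ((0 : Int), PySem.List.pyGetD l 0 0).1 = (k : Int) ∧
      l[k]? = some ((0 : Int), PySem.List.pyGetD l 0 0).2 := by
  have hlen : 0 < l.length := List.length_pos_iff.2 hl
  refine ⟨0, hlen, by simp, ?_⟩
  rw [PySem.List.pyGetD_zero, List.getD_eq_getElem?_getD, List.getElem?_eq_getElem hlen]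
  simp

theorem pvA_maxIndex_spec (l : List Int) (hl : l ≠ []) :
    ∃ k : ℕ, k < l.length ∧ (pvA_maxIndex l).1 = (k : Int) ∧
      l[k]? = some (pvA_maxIndex l).2 ∧ ∀ y ∈ l, y ≤ (pvA_maxIndex l).2 := by
  obtain ⟨⟨k, hk, hk1, hk2⟩, _, hall⟩ :=
    pvFoldSel_aux l (fun a b => a > b)
      (fun a => lt_irrefl a)
      (fun a b c hab hac => by omega)
      (fun a b c hab hbc => by omega)
      (PySem.List.enumerate l) ((0 : Int), PySem.List.pyGetD l 0 0)
      (pvEnumCover l) (pvInitState l hl)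
  refine ⟨k, hk, hk1, hk2, ?_⟩
  intro y hy
  obtain ⟨j, hj, rfl⟩ := List.mem_iff_getElem.1 hy
  have hq : ((0 : Int) + (j : Int), l[j]) ∈ PySem.List.enumerate l :=
    (PySem.List.mem_enumerate_iff l 0 _).2 ⟨j, hj, rfl⟩
  have := hall _ hq
  simpa using this

theorem pvA_minIndex_spec (l : List Int) (hl : l ≠ []) :
    ∃ k : ℕ, k < l.length ∧ (pvA_minIndex l).1 = (k : Int) ∧
      l[k]? = some (pvA_minIndex l).2 ∧ ∀ y ∈ l, (pvA_minIndex l).2 ≤ y := by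
  obtain ⟨⟨k, hk, hk1, hk2⟩, _, hall⟩ :=
    pvFoldSel_aux l (fun a b => a < b)
      (fun a => lt_irrefl a)
      (fun a b c hab hac => by omega)
      (fun a b c hab hbc => by omega)
      (PySem.List.enumerate l) ((0 : Int), PySem.List.pyGetD l 0 0)
      (pvEnumCover l) (pvInitState l hl)
  refine ⟨k, hk, hk1, hk2, ?_⟩
  intro y hy
  obtain ⟨j, hj, rfl⟩ := List.mem_iff_getElem.1 hy
  have hq : ((0 : Int) + (j : Int), l[j]) ∈ PySem.List.enumerate l :=
    (PySem.List.mem_enumerate_iff l 0 _).2 ⟨j, hj, rfl⟩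
  have := hall _ hq
  simpa using this

theorem pvPermRemOne (a : Int) : ∀ (l : List Int) (k : ℕ), l[k]? = some a →
    l.Perm (a :: l.eraseIdx k) := by
  intro l
  induction l with
  | nil => intro k h; simp at h
  | cons b t ih =>
    intro k h
    cases k with
    | zero =>
      simp at h
      subst h
      exact List.Perm.refl _
    | succ k =>
      simp only [List.getElem?_cons_succ] at h
      have ht := ih k h
      exact ((ht.cons b).trans (List.Perm.swap a b _))

theorem pvSetPerm : ∀ (l : List Int) (j : ℕ) (v : Int), j < l.length →
    (l.set j v).Perm (v :: l.eraseIdx j) := by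
  intro l
  induction l with
  | nil => intro j v h; simp at h
  | cons b t ih =>
    intro j v h
    cases j with
    | zero => simp
    | succ j =>
      simp only [List.set_cons_succ, List.eraseIdx_cons_succ]
      exact (((ih j v (by simpa using h)).cons b).trans (List.Perm.swap v b _))

theorem pvEraseIdxErase (l : List Int) (k : ℕ) (a : Int) (h : l[k]? = some a) :
    (l.eraseIdx k).Perm (l.erase a) :=
  List.Perm.cons_inv
    ((pvPermRemOne a l k h).symm.trans (List.perm_cons_erase (List.mem_of_getElem? h)))

theorem pvRebal_perm (p : Int) (hp : 2 ≤ p) :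
    ∀ (fuel : ℕ) (r1 r2 : List Int), r1 ≠ [] → (∀ x ∈ r1, 1 ≤ x) → r1.Perm r2 →
      (pvA_rebalLoop p fuel r1).Perm (pvB_rebalLoop p fuel r2) ∧
      (pvA_rebalLoop p fuel r1).length = r1.length ∧
      (∀ x ∈ pvA_rebalLoop p fuel r1, 1 ≤ x) := by
  intro fuel
  induction fuel with
  | zero => intro r1 r2 hne hpos hperm; exact ⟨hperm, rfl, hpos⟩
  | succ fuel ih =>
    intro r1 r2 hne hpos hperm
    obtain ⟨ja, hja, hja1, hja2, hjaMax⟩ := pvA_maxIndex_spec r1 hne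
    obtain ⟨jm, hjm, hjm1, hjm2, hjmMin⟩ := pvA_minIndex_spec r1 hne
    have hr2ne : r2 ≠ [] := fun h => hne (List.Perm.eq_nil (h ▸ hperm))
    simp only [pvA_rebalLoop, pvB_rebalLoop]
    cases hmx : PySem.List.max? r2 (fun x => x) with
    | none => exact absurd ((PySem.List.max?_eq_none_iff r2 _).1 hmx) hr2ne
    | some mx =>
    cases hmn : PySem.List.min? r2 (fun x => x) with
    | none => exact absurd ((PySem.List.min?_eq_none_iff r2 _).1 hmn) hr2ne
    | some mn =>
    simp only [Option.getD_some]
    have hvamem : (pvA_maxIndex r1).2 ∈ r1 := List.mem_of_getElem? hja2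
    have hvmmem : (pvA_minIndex r1).2 ∈ r1 := List.mem_of_getElem? hjm2
    have hmxmem : mx ∈ r1 := hperm.mem_iff.2 (PySem.List.max?_mem hmx)
    have hmnmem : mn ∈ r1 := hperm.mem_iff.2 (PySem.List.min?_mem hmn)
    have hva_eq : (pvA_maxIndex r1).2 = mx :=
      le_antisymm (PySem.List.max?_isMax hmx _ (hperm.mem_iff.1 hvamem)) (hjaMax mx hmxmem)
    have hvm_eq : (pvA_minIndex r1).2 = mn :=
      le_antisymm (hjmMin mn hmnmem) (PySem.List.min?_isMin hmn _ (hperm.mem_iff.1 hvmmem))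
    rw [hja1, hjm1, hva_eq, hvm_eq]
    have hja2' : r1[ja]? = some mx := hva_eq ▸ hja2
    have hjm2' : r1[jm]? = some mn := hvm_eq ▸ hjm2
    have hmn1 : 1 ≤ mn := hpos mn hmnmem
    by_cases hcond : mx > mn * p ∧ PySem.Int.mod mx p = 0
    · rw [if_pos hcond, if_pos hcond]
      obtain ⟨k, hk⟩ := (PySem.Int.mod_eq_zero_iff_dvd _ _).1 hcond.2
      have hkmn : mn < k := by nlinarith [hcond.1]
      have hfdiv : PySem.Int.floordiv mx p = k := by
        rw [PySem.Int.floordiv_eq_iff_of_pos (by omega : (0:ℤ) < p)]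
        constructor
        · nlinarith
        · nlinarith
      have hjane : ja ≠ jm := by
        intro h
        rw [h, hjm2'] at hja2'
        have hmxmn : mn = mx := by injection hja2'
        rw [← hmxmn] at hcond
        nlinarith [hcond.1, hmn1, hp]
      rw [hfdiv]
      rw [PySem.List.pySetD_natCast, PySem.List.pyGetD_natCast, PySem.List.pySetD_natCast]
      have hread : (r1.set ja k).getD jm 0 = mn := by
        rw [List.getD_eq_getElem?_getD, List.getElem?_set_ne hjane, hjm2']
        rfl
      rw [hread]
      have hmxr2 : mx ∈ r2 := PySem.List.max?_mem hmx
      rw [PySem.List.remove?_eq_some_erase r2 mx hmxr2, Option.getD_some]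
      have hmnne : mn ≠ mx := by nlinarith [hcond.1]
      have hmnr2' : mn ∈ r2.erase mx :=
        (List.mem_erase_of_ne hmnne).2 (PySem.List.min?_mem hmn)
      rw [PySem.List.remove?_eq_some_erase _ mn hmnr2', Option.getD_some]
      have hS1 : (r1.set ja k)[jm]? = some mn := by rw [List.getElem?_set_ne hjane]; exact hjm2'
      have hA1 : ((r1.set ja k).set jm (mn * p)).Perm ((mn * p) :: (r1.set ja k).eraseIdx jm) :=
        pvSetPerm _ jm _ (by rw [List.length_set]; exact hjm)
      have hA2 : ((r1.set ja k).eraseIdx jm).Perm ((r1.set ja k).erase mn) :=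
        pvEraseIdxErase _ jm mn hS1
      have hA3 : (r1.set ja k).Perm (k :: r1.erase mx) :=
        (pvSetPerm r1 ja k hja).trans ((pvEraseIdxErase r1 ja mx hja2').cons k)
      have hkne : ¬ ((k : Int) == mn) = true := by simp; omega
      have hA6 : (k :: r1.erase mx).erase mn = k :: (r1.erase mx).erase mn :=
        List.erase_cons_tail hkne
      have hL : ((r1.set ja k).set jm (mn * p)).Perm (mn * p :: k :: (r1.erase mx).erase mn) :=
        hA1.trans ((hA2.trans ((hA3.erase mn).trans (hA6 ▸ List.Perm.refl _))).cons _)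
      have hX : ((r2.erase mx).erase mn).Perm ((r1.erase mx).erase mn) :=
        ((hperm.erase mx).erase mn).symm
      have hR : ((r2.erase mx).erase mn ++ [k, mn * p]).Perm
          (mn * p :: k :: (r1.erase mx).erase mn) :=
        (List.perm_append_comm).trans ((List.Perm.swap (mn * p) k _).trans ((hX.cons k).cons _))
      have hLR : ((r1.set ja k).set jm (mn * p)).Perm ((r2.erase mx).erase mn ++ [k, mn * p]) :=
        hL.trans hR.symm
      have hlen1 : ((r1.set ja k).set jm (mn * p)).length = r1.length := by
        simp [List.length_set]
      have hne1 : (r1.set ja k).set jm (mn * p) ≠ [] := by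
        intro h
        rw [h] at hlen1
        exact hne (List.length_eq_zero_iff.1 hlen1.symm)
      have hpos1 : ∀ x ∈ (r1.set ja k).set jm (mn * p), 1 ≤ x := by
        intro x hx
        rcases List.mem_or_eq_of_mem_set hx with hx1 | rfl
        · rcases List.mem_or_eq_of_mem_set hx1 with hx2 | rfl
          · exact hpos x hx2
          · omega
        · nlinarith
      obtain ⟨P, L, Pos⟩ := ih _ _ hne1 hpos1 hLR
      exact ⟨P, by rw [L, hlen1], Pos⟩
    · rw [if_neg hcond, if_neg hcond]
      exact ⟨hperm, rfl, hpos⟩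

theorem pvRebalFold (f : ℕ → Int × Int) (hf : ∀ q, (f q).1 = (q : Int)) :
    ∀ (ps : List ℕ), (∀ q ∈ ps, q.Prime) →
    ∀ (r1 r2 : List Int), r1 ≠ [] → (∀ x ∈ r1, 1 ≤ x) → r1.Perm r2 →
    ((ps.map (fun q : ℕ => (q : Int))).foldl
        (fun r v => pvA_rebalLoop v ((r.map Int.natAbs).sum + 1) r) r1).Perm
      ((ps.map f).foldl (fun r pe => pvB_rebalLoop pe.1 ((r.map Int.natAbs).sum + 1) r) r2) := by
  intro ps
  induction ps with
  | nil => intro _ r1 r2 _ _ h; exact h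
  | cons q rest ih =>
    intro hpr r1 r2 hne hpos hperm
    rw [List.map_cons, List.map_cons, List.foldl_cons, List.foldl_cons, hf q]
    have hfuel : ((r2.map Int.natAbs).sum + 1) = ((r1.map Int.natAbs).sum + 1) := by
      rw [(hperm.map Int.natAbs).sum_eq]
    rw [hfuel]
    obtain ⟨P, L, Pos⟩ := pvRebal_perm (q : Int)
      (by exact_mod_cast (hpr q (by simp)).two_le)
      ((r1.map Int.natAbs).sum + 1) r1 r2 hne hpos hperm
    have hne' : pvA_rebalLoop (q : Int) ((r1.map Int.natAbs).sum + 1) r1 ≠ [] := by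
      intro h
      rw [h] at L
      exact hne (List.length_eq_zero_iff.1 L.symm)
    exact ih (fun z hz => hpr z (by simp [hz])) _ _ hne' Pos P

theorem pvMapOne : ∀ (l : List Int), l.map (fun _ => (1 : Int)) = List.replicate l.length 1 := by
  intro l
  induction l with
  | nil => rfl
  | cons a t ih => simp [ih, List.replicate_succ]

theorem pvInitEq (dim : Int) :
    (PySem.List.pyRange 0 dim 1).map (fun _ => (1 : Int)) = List.replicate dim.toNat 1 := by
  rw [pvMapOne, PySem.List.length_pyRange_one]
  norm_num

theorem pvReplPos (k : ℕ) : ∀ x ∈ List.replicate k (1 : Int), 1 ≤ x := by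
  intro x hx
  rw [List.eq_of_mem_replicate hx]

theorem pvPairRepl (m : ℕ) :
    (List.replicate m (1 : Int)).Pairwise (fun a b => b ≤ a) := by
  rw [List.pairwise_replicate]
  right; rfl

theorem pvStepRepl (dim p : Int) (hdim : 1 ≤ dim) (m : ℕ) :
    PySem.List.pySetD (List.replicate (m + 1) (1 : Int)) (PySem.Int.mod 0 dim)
      (PySem.List.pyGetD (List.replicate (m + 1) (1 : Int)) (PySem.Int.mod 0 dim) 0 * p)
      = p :: List.replicate m 1 := by
  have h0 : PySem.Int.mod 0 dim = ((0 : ℕ) : Int) := by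
    rw [PySem.Int.mod_eq_emod_of_pos (by omega)]
    simp
  rw [h0, PySem.List.pySetD_natCast, PySem.List.pyGetD_natCast, List.replicate_succ]
  simp

theorem pvA_breakOnce (v : Int) (r : List Int) (fuel : ℕ)
    (h : ¬ ((pvA_maxIndex r).2 > (pvA_minIndex r).2 * v ∧
      PySem.Int.mod (pvA_maxIndex r).2 v = 0)) :
    pvA_rebalLoop v (fuel + 1) r = r := by
  simp only [pvA_rebalLoop]
  rw [if_neg h]

theorem pvB_breakOnce (p : Int) (r : List Int) (fuel : ℕ) (mx mn : Int)
    (hmx : PySem.List.max? r (fun x => x) = some mx)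
    (hmn : PySem.List.min? r (fun x => x) = some mn)
    (h : ¬ (mx > mn * p ∧ PySem.Int.mod mx p = 0)) :
    pvB_rebalLoop p (fuel + 1) r = r := by
  simp only [pvB_rebalLoop, hmx, hmn, Option.getD_some]
  rw [if_neg h]

theorem pv_main_one (dim : Int) : make_process_grid 1 dim = make_process_grid_alt 1 dim := by
  have hf : pvB_factors 1 = [] := by decide
  simp only [make_process_grid, make_process_grid_alt, hf, PySem.List.pyRepeat_singleton,
    pvB_dist, List.foldl_nil, pvInitEq]
  rw [if_pos (by decide)]
  rw [PySem.List.sorted_rev_eq_self_of_pairwise _ _ (pvPairRepl _),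
    PySem.List.sorted_rev_eq_self_of_pairwise _ _ (pvPairRepl _)]

theorem pvTopOnes_mem (p : Int) (m : ℕ) : ∀ x ∈ p :: List.replicate m (1 : Int), x = p ∨ x = 1 := by
  intro x hx
  rcases List.mem_cons.1 hx with h | h
  · exact Or.inl h
  · exact Or.inr (List.eq_of_mem_replicate h)

theorem pv_two_rebal (dim : Int) (m : ℕ) (fuel : ℕ) :
    pvA_rebalLoop 2 (fuel + 1) (2 :: List.replicate m (1 : Int)) = 2 :: List.replicate m 1 ∧
    pvB_rebalLoop 2 (fuel + 1) (2 :: List.replicate m (1 : Int)) = 2 :: List.replicate m 1 := by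
  have hne : (2 :: List.replicate m (1 : Int)) ≠ [] := by simp
  have hposall : ∀ x ∈ 2 :: List.replicate m (1 : Int), 1 ≤ x := by
    intro x hx
    rcases pvTopOnes_mem 2 m x hx with h | h <;> omega
  have hle2 : ∀ x ∈ 2 :: List.replicate m (1 : Int), x ≤ 2 := by
    intro x hx
    rcases pvTopOnes_mem 2 m x hx with h | h <;> omega
  constructor
  · obtain ⟨ja, hja, hja1, hja2, hjaMax⟩ := pvA_maxIndex_spec _ hne
    obtain ⟨jm, hjm, hjm1, hjm2, hjmMin⟩ := pvA_minIndex_spec _ hne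
    apply pvA_breakOnce
    intro ⟨hgt, _⟩
    have h1 := hle2 _ (List.mem_of_getElem? hja2)
    have h2 := hposall _ (List.mem_of_getElem? hjm2)
    nlinarith
  · cases hmx : PySem.List.max? (2 :: List.replicate m (1 : Int)) (fun x => x) with
    | none => exact absurd ((PySem.List.max?_eq_none_iff _ _).1 hmx) hne
    | some mx =>
    cases hmn : PySem.List.min? (2 :: List.replicate m (1 : Int)) (fun x => x) with
    | none => exact absurd ((PySem.List.min?_eq_none_iff _ _).1 hmn) hne
    | some mn =>
    apply pvB_breakOnce _ _ _ _ _ hmx hmn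
    intro ⟨hgt, _⟩
    have h1 := hle2 _ (PySem.List.max?_mem hmx)
    have h2 := hposall _ (PySem.List.min?_mem hmn)
    nlinarith

theorem pvPairTop2 (m : ℕ) :
    (2 :: List.replicate m (1 : Int)).Pairwise (fun a b => b ≤ a) := by
  rw [List.pairwise_cons]
  refine ⟨fun b hb => by rw [List.eq_of_mem_replicate hb]; norm_num, pvPairRepl m⟩

theorem pv_alt_two (dim : Int) (hdim : 1 ≤ dim) (m : ℕ) (hm : dim.toNat = m + 1) :
    make_process_grid_alt 2 dim = 2 :: List.replicate m 1 := by
  have hf : pvB_factors 2 = [(2, 1)] := by decide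
  have hrange : PySem.List.pyRange 0 1 1 = [0] := by decide
  simp only [make_process_grid_alt, hf, PySem.List.pyRepeat_singleton, pvB_dist,
    hrange, List.foldl_cons, List.foldl_nil, hm]
  rw [pvStepRepl dim 2 hdim m]
  rw [PySem.List.sorted_rev_eq_self_of_pairwise _ _ (pvPairTop2 m)]
  rw [(pv_two_rebal dim m _).2]
  rw [PySem.List.sorted_rev_eq_self_of_pairwise _ _ (pvPairTop2 m)]

theorem pv_main_two (dim : Int) (hdim : 1 ≤ dim) :
    make_process_grid 2 dim = make_process_grid_alt 2 dim := by
  obtain ⟨m, hm⟩ : ∃ m, dim.toNat = m + 1 := ⟨dim.toNat - 1, by omega⟩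
  rw [pv_alt_two dim hdim m hm]
  simp only [make_process_grid, pvInitEq]
  rw [if_neg (by decide), if_pos (by decide), hm]
  rw [show (0 : Int) = ((0 : ℕ) : Int) from by norm_num, PySem.List.pySetD_natCast,
    List.replicate_succ, List.set_cons_zero]

theorem pvOnesBot_mem (v : Int) (m : ℕ) :
    ∀ x ∈ List.replicate m (1 : Int) ++ [v], x = 1 ∨ x = v := by
  intro x hx
  rcases List.mem_append.1 hx with h | h
  · exact Or.inl (List.eq_of_mem_replicate h)
  · exact Or.inr (by simpa using h)

theorem pvPairBot (v : Int) (hv : v ≤ 1) (m : ℕ) :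
    (List.replicate m (1 : Int) ++ [v]).Pairwise (fun a b => b ≤ a) := by
  rw [List.pairwise_append]
  refine ⟨pvPairRepl m, List.pairwise_singleton _ _, ?_⟩
  intro a ha b hb
  have hb1 : b = v := by simpa using hb
  rw [List.eq_of_mem_replicate ha, hb1]
  exact hv

theorem pv_neg_rebal (n : Int) (hn : n ≤ -2) (m : ℕ) (fuel : ℕ) :
    pvA_rebalLoop n (fuel + 1) (List.replicate m (1 : Int) ++ [n]) =
      List.replicate m 1 ++ [n] ∧
    pvB_rebalLoop n (fuel + 1) (List.replicate m (1 : Int) ++ [n]) =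
      List.replicate m 1 ++ [n] := by
  have hne : (List.replicate m (1 : Int) ++ [n]) ≠ [] := by simp
  have hmemn : n ∈ List.replicate m (1 : Int) ++ [n] := by simp
  have hle1 : ∀ x ∈ List.replicate m (1 : Int) ++ [n], x ≤ 1 := by
    intro x hx
    rcases pvOnesBot_mem n m x hx with h | h <;> omega
  constructor
  · obtain ⟨ja, hja, hja1, hja2, hjaMax⟩ := pvA_maxIndex_spec _ hne
    obtain ⟨jm, hjm, hjm1, hjm2, hjmMin⟩ := pvA_minIndex_spec _ hne
    apply pvA_breakOnce
    intro ⟨hgt, _⟩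
    have h1 := hle1 _ (List.mem_of_getElem? hja2)
    have h2 := hjmMin n hmemn
    nlinarith
  · cases hmx : PySem.List.max? (List.replicate m (1 : Int) ++ [n]) (fun x => x) with
    | none => exact absurd ((PySem.List.max?_eq_none_iff _ _).1 hmx) hne
    | some mx =>
    cases hmn : PySem.List.min? (List.replicate m (1 : Int) ++ [n]) (fun x => x) with
    | none => exact absurd ((PySem.List.min?_eq_none_iff _ _).1 hmn) hne
    | some mn =>
    apply pvB_breakOnce _ _ _ _ _ hmx hmn
    intro ⟨hgt, _⟩
    have h1 := hle1 _ (PySem.List.max?_mem hmx)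
    have h2 := PySem.List.min?_isMin hmn n hmemn
    nlinarith

theorem pv_main_neg (n dim : Int) (hn : n ≤ -2) (hdim : 1 ≤ dim) :
    make_process_grid n dim = make_process_grid_alt n dim := by
  obtain ⟨m, hm⟩ : ∃ m, dim.toNat = m + 1 := ⟨dim.toNat - 1, by omega⟩
  have hprimes : pvA_primeFactors n n = [n] := by
    rw [pvA_primeFactors, if_pos (pvA_isPrime_of_nonpos n (by omega))]
  have hmodnn : PySem.Int.mod n n = 0 := (PySem.Int.mod_eq_zero_iff_dvd n n).2 dvd_rfl
  have hfl : PySem.Int.floordiv n n = 1 := by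
    have h := PySem.Int.floordiv_mul_add_mod n n
    rw [hmodnn, add_zero] at h
    have h2 : PySem.Int.floordiv n n * n = 1 * n := by rw [one_mul]; exact h
    exact mul_right_cancel₀ (by omega : n ≠ (0:Int)) h2
  have hmod1n : ¬ PySem.Int.mod 1 n = 0 := by
    rw [PySem.Int.mod_eq_zero_iff_dvd]
    intro h
    have h2 : n.natAbs ∣ (1 : Int).natAbs := Int.natAbs_dvd_natAbs.2 h
    simp at h2
    omega
  -- A's division loop: exactly one pass
  have hdivA : pvA_divLoop dim n (n.natAbs + 1) (List.replicate (m + 1) 1, 0, n)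
      = (n :: List.replicate m 1, 1, 1) := by
    obtain ⟨f, hf⟩ : ∃ f, n.natAbs + 1 = f + 2 := ⟨n.natAbs - 1, by omega⟩
    rw [hf]
    rw [pvA_divLoop, if_pos hmodnn]
    rw [pvStepRepl dim n hdim m, hfl]
    rw [pvA_divLoop, if_neg hmod1n]
    norm_num
  -- B's factor list
  have hfB : pvB_factors n = [(n, 1)] := by
    have htrial : pvB_trial (n.natAbs + 2) n 2 [] = (n, []) := by
      obtain ⟨g, hg⟩ : ∃ g, n.natAbs + 2 = g + 1 := ⟨n.natAbs + 1, by omega⟩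
      rw [hg, pvB_trial, if_neg (by omega : ¬ (2 : Int) * 2 ≤ n)]
    simp only [pvB_factors, htrial]
    rw [if_pos (by omega : n ≠ 1)]
    simp
  have hrange : PySem.List.pyRange 0 1 1 = [0] := by decide
  have hsorted : PySem.List.sorted (n :: List.replicate m (1 : Int)) (fun x => x) true
      = List.replicate m 1 ++ [n] := by
    apply pvSortedRevEq
    · exact List.perm_append_singleton n _
    · exact pvPairBot n (by omega) m
  simp only [make_process_grid, make_process_grid_alt, hprimes, hfB,
    PySem.List.pyRepeat_singleton, pvInitEq, hm, pvB_dist, hrange, List.foldl_cons,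
    List.foldl_nil, pvA_distLoop, hdivA]
  rw [if_neg (by simp; omega), if_neg (by simp; omega)]
  rw [pvStepRepl dim n hdim m]
  rw [hsorted]
  rw [(pv_neg_rebal n hn m _).1, (pv_neg_rebal n hn m _).2]

theorem pv_main_big (n dim : Int) (hn : 3 ≤ n) (hdim : 1 ≤ dim) :
    make_process_grid n dim = make_process_grid_alt n dim := by
  have hnN : n = ((n.toNat : ℕ) : Int) := by omega
  have hN3 : 3 ≤ n.toNat := by omega
  have hnodup : (pvPrimesAsc n.toNat).Nodup :=
    (pv_pairwise_PrimesAsc n.toNat).imp (fun h => ne_of_lt h)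
  have hprime : ∀ p ∈ pvPrimesAsc n.toNat, p.Prime := by
    intro p hp
    exact ((pv_mem_PrimesAsc (by omega : 1 ≤ n.toNat)).1 hp).1
  simp only [make_process_grid, make_process_grid_alt, pvInitEq,
    PySem.List.pyRepeat_singleton, pvA_primes_eq n (by omega), pvB_factors_eq n (by omega)]
  rw [if_neg (by simp; omega), if_neg (by simp; omega)]
  obtain ⟨R, hdist⟩ := pvDist_eq dim (pvPrimesAsc n.toNat) (List.replicate dim.toNat 1) 0
    n.toNat (by omega) hnodup hprime
  rw [show pvA_distLoop dim ((pvPrimesAsc n.toNat).map (fun p : ℕ => (p : Int)))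
      (List.replicate dim.toNat 1, 0, n)
    = pvA_distLoop dim ((pvPrimesAsc n.toNat).map (fun p : ℕ => (p : Int)))
      (List.replicate dim.toNat 1, 0, ((n.toNat : ℕ) : Int)) from by rw [← hnN]]
  rw [hdist]
  have hinv := pvDist_inv dim hdim
    ((pvPrimesAsc n.toNat).map (fun p : ℕ => ((p : Int), ((n.toNat).factorization p : Int))))
    (List.replicate dim.toNat 1, 0)
    (by
      intro pe hpe
      obtain ⟨p, hp, rfl⟩ := List.mem_map.1 hpe
      have := (hprime p hp).two_le
      simp only []
      exact_mod_cast by omega)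
    (by simp)
    (pvReplPos _)
  set S0 := (pvB_dist dim
    ((pvPrimesAsc n.toNat).map (fun p : ℕ => ((p : Int), ((n.toNat).factorization p : Int))))
    (List.replicate dim.toNat 1, 0)).1 with hS0
  have hSposall : ∀ x ∈ PySem.List.sorted S0 (fun x => x) true, 1 ≤ x := by
    intro x hx
    exact hinv.2 x ((PySem.List.mem_sorted _ _ _ _).1 hx)
  have hSne : PySem.List.sorted S0 (fun x => x) true ≠ [] := by
    intro h
    rw [PySem.List.sorted_eq_nil_iff] at h
    have hlen := hinv.1
    rw [h] at hlen
    simp at hlen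
    omega
  have hperm := pvRebalFold
    (fun p : ℕ => ((p : Int), ((n.toNat).factorization p : Int))) (fun q => rfl)
    (pvPrimesAsc n.toNat) hprime
    (PySem.List.sorted S0 (fun x => x) true) (PySem.List.sorted S0 (fun x => x) true)
    hSne hSposall (List.Perm.refl _)
  exact pvSortedRevCongr _ _ hperm

theorem pv_main : ∀ (n dim : Int),
    (n = 1 ∨ (1 ≤ dim ∧ (2 ≤ n ∨ n ≤ -2))) →
    make_process_grid n dim = make_process_grid_alt n dim := by
  intro n dim hpre
  rcases hpre with rfl | ⟨hdim, hn | hn⟩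
  · exact pv_main_one dim
  · rcases eq_or_lt_of_le hn with h2 | h3
    · rw [← h2]
      exact pv_main_two dim hdim
    · exact pv_main_big n dim (by omega) hdim
  · exact pv_main_neg n dim hn hdim
-- ===== VERDICT (by name: the statement is the Claim_ definition above) =====
theorem make_process_grid_spec : Claim_equal_make_process_grid := by
  intro n dim _ hpre
  exact pv_main n dim hpre
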